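-- pv_equiv track=rewrite | github.com/amirsol81/html-Element-Inspector | globalPlugins/htmlElementInspector.py | _format_tag_block
-- ===== SOURCE A (Python) =====
-- def _safe(v):
--     try:
--         return "" if v is None else str(v)
--     except Exception:
--         return ""
--
-- def _ordered_params(tag_name, attrs):
--     attrs = attrs or {}
--     preferred = [
--         "tag", "id", "class",
--         "role", "xml-roles",
--         "orientation",
--         "MSAA Role",
--         "IA2 Role",
--         "href", "src",
--         "type", "text-input-type",
--         "name", "html-input-name",
--         "accessible-name", "accessible-name-from",
--         "formcontrolname",
--         "value", "valuetext",
--         "required", "multiline",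
--         "contenteditable", "tabindex",
--         "maxlength", "autocomplete",
--         "haspopup", "expanded",
--         "selected",
--         "checkable", "checked",
--         "pressed",
--         "label", "title",
--         "describedby", "description",
--         "description-from", "labelledby",
--         "name-from", "explicit-name", "explicit-name-from",
--         "level", "posinset", "setsize",
--         "colspan", "rowspan", "table-cell-index",
--         "readonly", "fsFormField",
--         "display", "layout-guess", "text-align", "text-model",
--     ]
--     seen = set()
--     keys = []
--     for k in preferred:
--         if k in attrs and k not in seen:
--             keys.append(k)
--             seen.add(k)
--     for k in sorted(attrs.keys(), key=lambda s: s.lower()):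
--         if k not in seen:
--             keys.append(k)
--             seen.add(k)
--     return keys
--
-- def _format_tag_block(tag_name, attrs):
--     keys = _ordered_params(tag_name, attrs)
--     out_lines = []
--     out_lines.append("")  # blank line BEFORE the header
--     # Skip empty values to reduce noise (e.g., accessible-name= on containers).
--     pairs = []
--     for k in keys:
--         v = _safe((attrs or {}).get(k, "")).strip()
--         if v == "":
--             continue
--         pairs.append((k, v))
--     out_lines.append(f"Tag {tag_name.upper()} has {len(pairs)} parameters:")
--     for k, v in pairs:
--         out_lines.append(f"{k}={v}")
--     out_lines.append("")  # blank line after each block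
--     return "\n".join(out_lines)
-- ===== SOURCE B (Python) =====
-- def _format_tag_block(tag_name, attrs):
--     attrs = attrs or {}
--     preferred = [
--         "tag", "id", "class",
--         "role", "xml-roles",
--         "orientation",
--         "MSAA Role",
--         "IA2 Role",
--         "href", "src",
--         "type", "text-input-type",
--         "name", "html-input-name",
--         "accessible-name", "accessible-name-from",
--         "formcontrolname",
--         "value", "valuetext",
--         "required", "multiline",
--         "contenteditable", "tabindex",
--         "maxlength", "autocomplete",
--         "haspopup", "expanded",
--         "selected",
--         "checkable", "checked",
--         "pressed",
--         "label", "title",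
--         "describedby", "description",
--         "description-from", "labelledby",
--         "name-from", "explicit-name", "explicit-name-from",
--         "level", "posinset", "setsize",
--         "colspan", "rowspan", "table-cell-index",
--         "readonly", "fsFormField",
--         "display", "layout-guess", "text-align", "text-model",
--     ]
--     priority = {k: i for i, k in enumerate(preferred)}
--     keys = sorted(attrs, key=lambda k: (priority.get(k, len(preferred)), k.lower()))
--     pairs = [(k, v) for k in keys if (v := ("" if attrs.get(k, "") is None else str(attrs.get(k, ""))).strip())]
--     lines = ["", f"Tag {tag_name.upper()} has {len(pairs)} parameters:"]
--     lines += [f"{k}={v}" for k, v in pairs]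
--     lines.append("")
--     return "\n".join(lines)
-- ===== Notes on version B (the rewrite author's own statement) =====
-- stated objective: simpler
-- what changed: Replaces the two-phase key ordering (walk the preferred list collecting present keys into a seen-set, then separately sort and filter the remaining keys) by one composite-key sort over a prebuilt priority index, and builds the pairs and output lines with comprehensions instead of accumulator loops.
import Mathlib
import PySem

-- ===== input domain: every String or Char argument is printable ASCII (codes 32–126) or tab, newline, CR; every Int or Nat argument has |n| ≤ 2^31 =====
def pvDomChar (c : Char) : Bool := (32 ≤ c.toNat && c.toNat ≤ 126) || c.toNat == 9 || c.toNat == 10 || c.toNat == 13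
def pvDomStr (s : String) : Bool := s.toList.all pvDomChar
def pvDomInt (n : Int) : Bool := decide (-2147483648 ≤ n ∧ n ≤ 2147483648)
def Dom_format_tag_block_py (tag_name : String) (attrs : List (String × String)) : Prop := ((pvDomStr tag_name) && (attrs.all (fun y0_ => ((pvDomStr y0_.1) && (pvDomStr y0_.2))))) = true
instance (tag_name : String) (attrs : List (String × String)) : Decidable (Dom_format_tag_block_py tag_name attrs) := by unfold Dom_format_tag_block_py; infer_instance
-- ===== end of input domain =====

-- B replaces A's two-phase key ordering (preferred-list walk + separate sort of the rest)
-- by a single stable sort under a composite (priority-index, lowercased-key) key; same output.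


-- shared literal data: the module's `preferred` list (52 names)
def pvPreferred : List String :=
  ["tag", "id", "class",
   "role", "xml-roles",
   "orientation",
   "MSAA Role",
   "IA2 Role",
   "href", "src",
   "type", "text-input-type",
   "name", "html-input-name",
   "accessible-name", "accessible-name-from",
   "formcontrolname",
   "value", "valuetext",
   "required", "multiline",
   "contenteditable", "tabindex",
   "maxlength", "autocomplete",
   "haspopup", "expanded",
   "selected",
   "checkable", "checked",
   "pressed",
   "label", "title",
   "describedby", "description",
   "description-from", "labelledby",
   "name-from", "explicit-name", "explicit-name-from",
   "level", "posinset", "setsize",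
   "colspan", "rowspan", "table-cell-index",
   "readonly", "fsFormField",
   "display", "layout-guess", "text-align", "text-model"]

-- ===== PORT A =====
-- _safe: every value here is already a str (never None, str() cannot raise), so _safe is the identity; exact on this domain
def pvSafe (v : String) : String := v

-- _ordered_params: first loop over preferred with a seen-set, then loop over sorted(attrs.keys(), key=lower)
def pvOrderedParams (tag_name : String) (attrs : PySem.Dict String String) : List String :=
  let st1 : PySem.Set String × List String :=
    pvPreferred.foldl
      (fun st k => if attrs.contains k && !(PySem.Set.contains st.1 k)
                   then (PySem.Set.add st.1 k, st.2 ++ [k]) else st)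
      (PySem.Set.empty, [])
  let st2 : PySem.Set String × List String :=
    (PySem.List.sorted (PySem.Dict.keys attrs) (fun s => PySem.Str.lower s) false).foldl
      (fun st k => if !(PySem.Set.contains st.1 k)
                   then (PySem.Set.add st.1 k, st.2 ++ [k]) else st)
      st1
  st2.2

def format_tag_block_py (tag_name : String) (attrs : List (String × String)) : String :=
  let d : PySem.Dict String String := PySem.Dict.ofList attrs   -- the Python receives attrs as a dict
  let keys := pvOrderedParams tag_name d
  let out_lines : List String := [""]
  let pairs : List (String × String) :=
    keys.foldl (fun ps k =>
      let v := PySem.Str.strip (pvSafe (d.getD k ""))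
      if v = "" then ps else ps ++ [(k, v)]) []
  let out_lines := out_lines ++
    ["Tag " ++ PySem.Str.upper tag_name ++ " has " ++ PySem.Int.toStr (pairs.length : Int) ++ " parameters:"]
  let out_lines := pairs.foldl (fun ls p => ls ++ [p.1 ++ "=" ++ p.2]) out_lines
  let out_lines := out_lines ++ [""]
  PySem.Str.join "\n" out_lines

-- ===== PORT B =====
-- priority = {k: i for i, k in enumerate(preferred)}
def pvPriority : PySem.Dict String Int :=
  (PySem.List.enumerate pvPreferred 0).foldl (fun d p => d.insert p.2 p.1) PySem.Dict.empty

def format_tag_block_py_alt (tag_name : String) (attrs : List (String × String)) : String :=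
  let d : PySem.Dict String String := PySem.Dict.ofList attrs
  let keys := PySem.List.sorted2 (PySem.Dict.keys d)
      (fun k => pvPriority.getD k (pvPreferred.length : Int))
      (fun k => PySem.Str.lower k) false
  let pairs : List (String × String) :=
    keys.filterMap (fun k =>
      let v := PySem.Str.strip (d.getD k "")
      if v = "" then none else some (k, v))
  let lines : List String :=
    ["", "Tag " ++ PySem.Str.upper tag_name ++ " has " ++ PySem.Int.toStr (pairs.length : Int) ++ " parameters:"]
  let lines := lines ++ pairs.map (fun p => p.1 ++ "=" ++ p.2)
  let lines := lines ++ [""]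
  PySem.Str.join "\n" lines

-- ===== PRECONDITION & SPEC =====
def Spec_format_tag_block_py (tag_name : String) (attrs : List (String × String)) (out : String) : Prop := out = format_tag_block_py_alt tag_name attrs
instance (tag_name : String) (attrs : List (String × String)) (out : String) : Decidable (Spec_format_tag_block_py tag_name attrs out) := by unfold Spec_format_tag_block_py; infer_instance

-- ===== CLAIM (what is proved, stated in full; the proofs are below) =====
def Claim_equal_format_tag_block_py : Prop := ∀ (tag_name : String) (attrs : List (String × String)), Dom_format_tag_block_py tag_name attrs → Spec_format_tag_block_py tag_name attrs (format_tag_block_py tag_name attrs)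

-- ===== LEMMAS AND PROOFS =====

def pvIsort {α : Type} (before : α → α → Bool) (xs : List α) : List α :=
  xs.foldl (fun acc x => PySem.List.insertBy before x acc) []

theorem pvSorted_eq_isort {α κ : Type} [LinearOrder κ] (xs : List α) (key : α → κ) :
    PySem.List.sorted xs key false = pvIsort (fun a b => decide (key a < key b)) xs := rfl

theorem pvSorted2_eq_isort {α : Type} (xs : List α) (k1 : α → Int) (k2 : α → String) :
    PySem.List.sorted2 xs k1 k2 false =
      pvIsort (fun a b => decide (k1 a < k1 b) || (!decide (k1 b < k1 a) && decide (k2 a < k2 b))) xs := rfl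

theorem pvMem_isort {α : Type} (before : α → α → Bool) (xs : List α) (y : α) :
    y ∈ pvIsort before xs ↔ y ∈ xs := by
  suffices h : ∀ acc : List α, y ∈ xs.foldl (fun acc x => PySem.List.insertBy before x acc) acc ↔ y ∈ acc ∨ y ∈ xs by
    simpa [pvIsort] using h []
  induction xs with
  | nil => simp
  | cons x t ih =>
    intro acc
    simp [List.foldl_cons, ih, PySem.List.mem_insertBy]
    tauto

theorem pvInsertBy_congr {α : Type} (b1 b2 : α → α → Bool) (x : α) (L : List α)
    (h : ∀ z ∈ L, b1 x z = b2 x z) :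
    PySem.List.insertBy b1 x L = PySem.List.insertBy b2 x L := by
  induction L with
  | nil => rfl
  | cons y ys ih =>
    simp only [PySem.List.insertBy]
    rw [h y (by simp)]
    split
    · rfl
    · rw [ih (fun z hz => h z (by simp [hz]))]

theorem pvIsort_congr {α : Type} (b1 b2 : α → α → Bool) (xs : List α)
    (h : ∀ a ∈ xs, ∀ b ∈ xs, b1 a b = b2 a b) :
    pvIsort b1 xs = pvIsort b2 xs := by
  suffices hh : ∀ (ts acc : List α), (∀ a ∈ ts, a ∈ xs) → (∀ a ∈ acc, a ∈ xs) →
      ts.foldl (fun acc x => PySem.List.insertBy b1 x acc) acc = ts.foldl (fun acc x => PySem.List.insertBy b2 x acc) acc by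
    exact hh xs [] (fun a ha => ha) (by simp)
  intro ts
  induction ts with
  | nil => intro acc _ _; rfl
  | cons t ts ih =>
    intro acc hts hacc
    simp only [List.foldl_cons]
    rw [pvInsertBy_congr b1 b2 t acc (fun z hz => h t (hts t (by simp)) z (hacc z hz))]
    exact ih _ (fun a ha => hts a (by simp [ha]))
      (fun a ha => by
        rcases (PySem.List.mem_insertBy b2 t a acc).1 ha with h1 | h2
        · exact h1 ▸ hts t (by simp)
        · exact hacc a h2)

theorem pvInsertBy_all_before {α : Type} (before : α → α → Bool) (x : α) (L : List α)
    (h : ∀ z ∈ L, before x z = true) :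
    PySem.List.insertBy before x L = x :: L := by
  cases L with
  | nil => rfl
  | cons y ys => simp [PySem.List.insertBy, h y (by simp)]

theorem pvInsertBy_append_left {α : Type} (before : α → α → Bool) (x : α) (L1 L2 : List α)
    (h : ∀ z ∈ L2, before x z = true) :
    PySem.List.insertBy before x (L1 ++ L2) = PySem.List.insertBy before x L1 ++ L2 := by
  induction L1 with
  | nil => simpa [PySem.List.insertBy] using pvInsertBy_all_before before x L2 h
  | cons y ys ih =>
    simp only [List.cons_append, PySem.List.insertBy]
    split
    · rfl
    · simp [ih]

theorem pvInsertBy_append_right {α : Type} (before : α → α → Bool) (x : α) (L1 L2 : List α)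
    (h : ∀ z ∈ L1, before x z = false) :
    PySem.List.insertBy before x (L1 ++ L2) = L1 ++ PySem.List.insertBy before x L2 := by
  induction L1 with
  | nil => rfl
  | cons y ys ih =>
    simp only [List.cons_append, PySem.List.insertBy, h y (by simp)]
    simp [ih (fun z hz => h z (by simp [hz]))]

theorem pvIsort_partition {α : Type} (before : α → α → Bool) (p : α → Bool) (xs : List α)
    (hpb : ∀ a b, p a = true → p b = false → before a b = true)
    (hnb : ∀ a b, p a = false → p b = true → before a b = false) :
    pvIsort before xs = pvIsort before (xs.filter p) ++ pvIsort before (xs.filter (fun x => !p x)) := by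
  induction xs using List.reverseRecOn with
  | nil => rfl
  | append_singleton xs x ih =>
    have hfold : ∀ (l : List α) (acc : List α), (l ++ [x]).foldl (fun acc y => PySem.List.insertBy before y acc) acc
        = PySem.List.insertBy before x (l.foldl (fun acc y => PySem.List.insertBy before y acc) acc) := by
      intro l acc; rw [List.foldl_append]; rfl
    cases hpx : p x with
    | true =>
      have h2 : ∀ z ∈ pvIsort before (xs.filter (fun x => !p x)), before x z = true := by
        intro z hz
        have := (pvMem_isort before _ z).1 hz
        have hzp : p z = false := by simpa using (List.mem_filter.1 this).2
        exact hpb x z hpx hzp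
      simp only [pvIsort] at *
      rw [hfold, ih, pvInsertBy_append_left _ _ _ _ h2,
        List.filter_append, List.filter_append]
      simp [hpx, hfold]
    | false =>
      have h1 : ∀ z ∈ pvIsort before (xs.filter p), before x z = false := by
        intro z hz
        have := (pvMem_isort before _ z).1 hz
        have hzp : p z = true := (List.mem_filter.1 this).2
        exact hnb x z hpx hzp
      simp only [pvIsort] at *
      rw [hfold, ih, pvInsertBy_append_right _ _ _ _ h1,
        List.filter_append, List.filter_append]
      simp [hpx, hfold]

theorem pvFilter_insertBy {α κ : Type} [LinearOrder κ] (key : α → κ) (q : α → Bool) (x : α) (L : List α)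
    (hL : L.Pairwise (fun a b => key a ≤ key b)) :
    (PySem.List.insertBy (fun a b => decide (key a < key b)) x L).filter q =
      if q x then PySem.List.insertBy (fun a b => decide (key a < key b)) x (L.filter q) else L.filter q := by
  induction L with
  | nil => cases hqx : q x <;> simp [PySem.List.insertBy, hqx]
  | cons y ys ih =>
    have hy : ∀ z ∈ ys, key y ≤ key z := (List.pairwise_cons.1 hL).1
    have hys := (List.pairwise_cons.1 hL).2
    by_cases hxy : key x < key y
    · -- x goes first
      have hall : ∀ z ∈ (y :: ys).filter q, decide (key x < key z) = true := by
        intro z hz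
        have hz' := (List.mem_filter.1 hz).1
        rcases List.mem_cons.1 hz' with h | h
        · subst h; simpa using hxy
        · simpa using lt_of_lt_of_le hxy (hy z h)
      rw [show PySem.List.insertBy (fun a b => decide (key a < key b)) x (y :: ys) = x :: y :: ys by
        simp [PySem.List.insertBy, hxy]]
      cases hqx : q x with
      | true =>
        rw [if_pos rfl,
          pvInsertBy_all_before _ _ _ hall]
        simp [List.filter_cons, hqx]
      | false =>
        simp [List.filter_cons, hqx]
    · rw [show PySem.List.insertBy (fun a b => decide (key a < key b)) x (y :: ys)
          = y :: PySem.List.insertBy (fun a b => decide (key a < key b)) x ys by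
        simp [PySem.List.insertBy, hxy]]
      cases hqy : q y with
      | true =>
        cases hqx : q x with
        | true =>
          have := ih hys
          rw [if_pos hqx] at this
          rw [if_pos rfl]
          rw [show List.filter q (y :: ys) = y :: List.filter q ys by simp [List.filter_cons, hqy]]
          rw [show PySem.List.insertBy (fun a b => decide (key a < key b)) x (y :: List.filter q ys)
              = y :: PySem.List.insertBy (fun a b => decide (key a < key b)) x (List.filter q ys) by
            simp [PySem.List.insertBy, hxy]]
          simp [List.filter_cons, hqy, this]
        | false =>
          have := ih hys
          rw [if_neg (by simp [hqx])] at this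
          simp [List.filter_cons, hqx, hqy, this]
      | false =>
        cases hqx : q x with
        | true =>
          have := ih hys
          rw [if_pos hqx] at this
          simp [List.filter_cons, hqx, hqy, this]
        | false =>
          have := ih hys
          rw [if_neg (by simp [hqx])] at this
          simp [List.filter_cons, hqx, hqy, this]

theorem pvFilter_sorted {α κ : Type} [LinearOrder κ] (key : α → κ) (q : α → Bool) (xs : List α) :
    (PySem.List.sorted xs key false).filter q = PySem.List.sorted (xs.filter q) key false := by
  induction xs using List.reverseRecOn with
  | nil => rfl
  | append_singleton xs x ih =>
    have hfold : ∀ (l : List α),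
        PySem.List.sorted (l ++ [x]) key false
          = PySem.List.insertBy (fun a b => decide (key a < key b)) x (PySem.List.sorted l key false) := by
      intro l
      show (l ++ [x]).foldl _ _ = _
      rw [List.foldl_append]; rfl
    rw [hfold, pvFilter_insertBy key q x _ (PySem.List.sorted_pairwise xs key), List.filter_append, ih]
    cases hqx : q x with
    | true =>
      rw [if_pos rfl, show List.filter q [x] = [x] by simp [hqx], hfold]
    | false =>
      rw [if_neg (by simp), show List.filter q [x] = ([] : List α) by simp [hqx]]
      simp

def pvPreferred_nodup : pvPreferred.Nodup := by decide

theorem pvPriority_items :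
    pvPriority.items = (PySem.List.enumerate pvPreferred 0).map (fun p => (p.2, p.1)) := by
  unfold pvPriority
  rw [PySem.Dict.items_foldl_insert_fresh (PySem.List.enumerate pvPreferred 0) (fun p => p.2) (fun p => p.1)
    PySem.Dict.empty (fun a _ => PySem.Dict.contains_empty a.2)
    (by rw [PySem.List.map_snd_enumerate]; exact pvPreferred_nodup)]
  simp
  rfl

theorem pvPriority_keys : pvPriority.keys = pvPreferred := by
  have : pvPriority.keys = pvPriority.items.map (·.1) := rfl
  rw [this, pvPriority_items, List.map_map]
  have : ((fun (p : String × Int) => p.1) ∘ (fun (p : Int × String) => (p.2, p.1))) = fun p => p.2 := rfl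
  rw [this, PySem.List.map_snd_enumerate]

theorem pvPriority_keys_nodup : pvPriority.keys.Nodup := by
  rw [pvPriority_keys]; exact pvPreferred_nodup

theorem pvPri_getElem (i : Nat) (h : i < pvPreferred.length) :
    pvPriority.getD pvPreferred[i] (pvPreferred.length : Int) = (i : Int) := by
  have hmem : ((i : Int), pvPreferred[i]) ∈ PySem.List.enumerate pvPreferred 0 := by
    rw [PySem.List.mem_enumerate_iff]
    exact ⟨i, h, by simp⟩
  have hitem : (pvPreferred[i], (i : Int)) ∈ pvPriority.items := by
    rw [pvPriority_items]
    exact List.mem_map.2 ⟨_, hmem, rfl⟩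
  exact PySem.Dict.getD_of_mem_items pvPriority hitem pvPriority_keys_nodup _

theorem pvPri_lt {a : String} (ha : a ∈ pvPreferred) :
    pvPriority.getD a (pvPreferred.length : Int) < (pvPreferred.length : Int) := by
  rcases List.mem_iff_getElem.1 ha with ⟨i, h, rfl⟩
  rw [pvPri_getElem i h]
  exact_mod_cast h

theorem pvPri_not_mem {a : String} (ha : a ∉ pvPreferred) :
    pvPriority.getD a (pvPreferred.length : Int) = (pvPreferred.length : Int) := by
  apply PySem.Dict.getD_of_not_contains
  rw [PySem.Dict.contains_eq_decide_mem_keys, pvPriority_keys]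
  simpa using ha

theorem pvPri_pairwise :
    pvPreferred.Pairwise (fun a b => pvPriority.getD a (pvPreferred.length : Int) < pvPriority.getD b (pvPreferred.length : Int)) := by
  rw [List.pairwise_iff_getElem]
  intro i j hi hj hij
  rw [pvPri_getElem i hi, pvPri_getElem j hj]
  exact_mod_cast hij

theorem pvPri_inj {a b : String} (ha : a ∈ pvPreferred) (hb : b ∈ pvPreferred)
    (h : pvPriority.getD a (pvPreferred.length : Int) = pvPriority.getD b (pvPreferred.length : Int)) : a = b := by
  rcases List.mem_iff_getElem.1 ha with ⟨i, hi, rfl⟩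
  rcases List.mem_iff_getElem.1 hb with ⟨j, hj, rfl⟩
  rw [pvPri_getElem i hi, pvPri_getElem j hj] at h
  have : i = j := by exact_mod_cast h
  subst this; rfl

theorem pvPhase1 (d : PySem.Dict String String) (Q : List String) :
    ∀ (seen : PySem.Set String) (acc : List String), Q.Nodup → (∀ k ∈ Q, k ∉ seen) →
    Q.foldl (fun st k => if d.contains k && !(PySem.Set.contains st.1 k)
                         then (PySem.Set.add st.1 k, st.2 ++ [k]) else st) (seen, acc) =
      (seen ++ Q.filter (fun k => d.contains k), acc ++ Q.filter (fun k => d.contains k)) := by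
  induction Q with
  | nil => intro seen acc _ _; simp
  | cons k Q ih =>
    intro seen acc hQ h
    have hk : k ∉ seen := h k (by simp)
    have hcon : PySem.Set.contains seen k = false := by
      rcases hc : PySem.Set.contains seen k with _ | _
      · rfl
      · exact absurd ((PySem.Set.contains_iff seen k).1 hc) hk
    simp only [List.foldl_cons, hcon, Bool.not_false, Bool.and_true]
    cases hd : d.contains k with
    | true =>
      rw [if_pos rfl, PySem.Set.add_of_not_mem hk,
        ih (seen ++ [k]) (acc ++ [k]) (List.nodup_cons.1 hQ).2
          (fun k' hk' => by
            have hne : k' ≠ k := fun he => (List.nodup_cons.1 hQ).1 (he ▸ hk')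
            simp [List.mem_append, hne, h k' (by simp [hk'])])]
      simp [List.filter_cons, hd]
    | false =>
      rw [if_neg (by simp)]
      rw [ih seen acc (List.nodup_cons.1 hQ).2 (fun k' hk' => h k' (by simp [hk']))]
      simp [List.filter_cons, hd]

theorem pvPhase2 (L : List String) :
    ∀ (seen : PySem.Set String) (acc : List String), L.Nodup →
    (L.foldl (fun st k => if !(PySem.Set.contains st.1 k)
                          then (PySem.Set.add st.1 k, st.2 ++ [k]) else st) (seen, acc)).2 =
      acc ++ L.filter (fun k => !(seen.contains k)) := by
  induction L with
  | nil => intro seen acc _; simp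
  | cons k L ih =>
    intro seen acc hL
    simp only [List.foldl_cons]
    cases hc : PySem.Set.contains seen k with
    | true =>
      have hkm : k ∈ seen := (PySem.Set.contains_iff seen k).1 hc
      rw [if_neg (by simp [hc])]
      rw [ih seen acc (List.nodup_cons.1 hL).2]
      simp [List.filter_cons, hc, hkm]
    | false =>
      have hk : k ∉ seen := by
        intro hm
        rw [(PySem.Set.contains_iff seen k).2 hm] at hc
        cases hc
      rw [if_pos (by simp [hc])]
      rw [ih _ _ (List.nodup_cons.1 hL).2]
      have hfc : List.filter (fun k' => !((PySem.Set.add seen k).contains k')) L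
          = List.filter (fun k' => !(seen.contains k')) L := by
        apply List.filter_congr
        intro k' hk'
        have hne : k' ≠ k := fun he => (List.nodup_cons.1 hL).1 (he ▸ hk')
        rw [PySem.Set.add_of_not_mem hk]
        simp only [PySem.Set.contains_eq_listContains]
        simp [hne]
      rw [hfc]
      simp [List.filter_cons, hc, hk]

set_option maxRecDepth 8192 in
theorem pvKeys_eq (d : PySem.Dict String String) (tag_name : String) (hnd : d.keys.Nodup) :
    pvOrderedParams tag_name d =
      PySem.List.sorted2 (PySem.Dict.keys d)
        (fun k => pvPriority.getD k (pvPreferred.length : Int))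
        (fun k => PySem.Str.lower k) false := by
  have hPL : PySem.List.sorted (PySem.Dict.keys d) (fun s => PySem.Str.lower s) false
      |>.Nodup := ((PySem.List.sorted_perm _ _ _).nodup_iff).2 hnd
  -- A side
  have hA : pvOrderedParams tag_name d =
      pvPreferred.filter (fun k => d.contains k) ++
        (PySem.List.sorted (PySem.Dict.keys d) (fun s => PySem.Str.lower s) false).filter
          (fun k => !(PySem.Set.contains (pvPreferred.filter (fun k => d.contains k)) k)) := by
    unfold pvOrderedParams
    rw [pvPhase1 d pvPreferred PySem.Set.empty [] pvPreferred_nodup (by intro k _; simp [PySem.Set.empty])]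
    simp only [PySem.Set.empty, List.nil_append]
    rw [pvPhase2 _ _ _ hPL]
  rw [hA]
  -- replace the seen-filter by a membership filter
  have hfc : (PySem.List.sorted (PySem.Dict.keys d) (fun s => PySem.Str.lower s) false).filter
        (fun k => !(PySem.Set.contains (pvPreferred.filter (fun k => d.contains k)) k))
      = (PySem.List.sorted (PySem.Dict.keys d) (fun s => PySem.Str.lower s) false).filter
        (fun k => !(decide (k ∈ pvPreferred))) := by
    apply List.filter_congr
    intro k hk
    have hks : k ∈ PySem.Dict.keys d := (PySem.List.mem_sorted _ _ _ _).1 hk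
    have hcon : d.contains k = true := by
      rw [PySem.Dict.contains_eq_decide_mem_keys]; simpa using hks
    simp only [PySem.Set.contains_eq_listContains]
    simp [List.mem_filter, hcon]
  rw [hfc, pvFilter_sorted]
  -- B side
  rw [pvSorted2_eq_isort]
  set pri : String → Int := fun k => pvPriority.getD k (pvPreferred.length : Int) with hpri
  set lt2 : String → String → Bool := fun a b =>
    decide (pri a < pri b) || (!decide (pri b < pri a) && decide (PySem.Str.lower a < PySem.Str.lower b)) with hlt2
  have hpart := pvIsort_partition lt2 (fun k => decide (k ∈ pvPreferred)) (PySem.Dict.keys d)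
    (by
      intro a b ha hb
      have ha' : a ∈ pvPreferred := by simpa using ha
      have hb' : b ∉ pvPreferred := by simpa using hb
      have := lt_of_lt_of_le (pvPri_lt ha') (le_of_eq (pvPri_not_mem hb').symm)
      simp [hlt2, hpri, this])
    (by
      intro a b ha hb
      have ha' : a ∉ pvPreferred := by simpa using ha
      have hb' : b ∈ pvPreferred := by simpa using hb
      have h1 : pri b < pri a := by
        rw [hpri]
        exact lt_of_lt_of_le (pvPri_lt hb') (le_of_eq (pvPri_not_mem ha').symm)
      simp [hlt2, h1, not_lt_of_gt h1])
  rw [hpart]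
  congr 1
  · -- preferred part
    rw [pvIsort_congr lt2 (fun a b => decide (pri a < pri b)) _
      (by
        intro a ha b hb
        have ha' : a ∈ pvPreferred := by simpa using (List.mem_filter.1 ha).2
        have hb' : b ∈ pvPreferred := by simpa using (List.mem_filter.1 hb).2
        rcases lt_trichotomy (pri a) (pri b) with h | h | h
        · simp [hlt2, h]
        · have : a = b := pvPri_inj ha' hb' h
          subst this
          simp [hlt2]
        · simp [hlt2, h, not_lt_of_gt h])]
    rw [← pvSorted_eq_isort]
    refine (PySem.List.sorted_eq_of_perm_of_pairwise_lt _ _ _ ?_ ?_).symm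
    · rw [List.perm_ext_iff_of_nodup (pvPreferred_nodup.filter _) (hnd.filter _)]
      intro a
      simp only [List.mem_filter]
      constructor
      · rintro ⟨haP, hac⟩
        refine ⟨?_, by simpa using haP⟩
        rw [PySem.Dict.contains_eq_decide_mem_keys] at hac
        simpa using hac
      · rintro ⟨haks, haP⟩
        refine ⟨by simpa using haP, ?_⟩
        rw [PySem.Dict.contains_eq_decide_mem_keys]
        simpa using haks
    · exact pvPri_pairwise.filter _
  · -- non-preferred part
    rw [pvIsort_congr lt2 (fun a b => decide (PySem.Str.lower a < PySem.Str.lower b)) _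
      (by
        intro a ha b hb
        have ha' : a ∉ pvPreferred := by simpa using (List.mem_filter.1 ha).2
        have hb' : b ∉ pvPreferred := by simpa using (List.mem_filter.1 hb).2
        simp [hlt2, hpri, pvPri_not_mem ha', pvPri_not_mem hb'])]
    rw [← pvSorted_eq_isort]

theorem pvPairs_fold (g : String → String) (keys : List String) :
    ∀ acc : List (String × String),
    keys.foldl (fun ps k => let v := g k; if v = "" then ps else ps ++ [(k, v)]) acc =
      acc ++ keys.filterMap (fun k => let v := g k; if v = "" then none else some (k, v)) := by
  induction keys with
  | nil => intro acc; simp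
  | cons k keys ih =>
    intro acc
    simp only [List.foldl_cons, List.filterMap_cons]
    by_cases h : g k = ""
    · simp only [h, if_pos rfl]
      simp [ih]
    · simp only [if_neg h]
      rw [ih]
      simp [h]

theorem pvLines_fold (pairs : List (String × String)) :
    ∀ init : List String,
    pairs.foldl (fun ls p => ls ++ [p.1 ++ "=" ++ p.2]) init =
      init ++ pairs.map (fun p => p.1 ++ "=" ++ p.2) := by
  induction pairs with
  | nil => intro init; simp
  | cons p pairs ih =>
    intro init
    simp [List.foldl_cons, ih]

set_option maxRecDepth 8192 in
theorem pvMain_format_tag_block : ∀ (tag_name : String) (attrs : List (String × String)),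
    format_tag_block_py tag_name attrs = format_tag_block_py_alt tag_name attrs := by
  intro tag_name attrs
  unfold format_tag_block_py format_tag_block_py_alt
  simp only [pvSafe]
  rw [pvKeys_eq _ tag_name (PySem.Dict.nodup_keys_ofList attrs)]
  rw [pvPairs_fold (fun k => PySem.Str.strip ((PySem.Dict.ofList attrs).getD k "")) _ []]
  rw [pvLines_fold]
  simp

-- ===== VERDICT (by name: the statement is the Claim_ definition above) =====
theorem format_tag_block_py_spec : Claim_equal_format_tag_block_py := by
  intro tag_name attrs _
  unfold Spec_format_tag_block_py
  exact pvMain_format_tag_block tag_name attrs
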